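-- pv_equiv track=rewrite | github.com/malgohip/PortafolioMalgo | Intro CC/Ejercicios Code Abey/269 Fibonacci coding.py | decode_fibonacci_bitstream
-- ===== SOURCE A (Python) =====
-- def decode_fibonacci_bitstream(bit_chunks):
--     fibonacci_sequence = [1, 2]
--     while sum(fibonacci_sequence) < 256:
--         fibonacci_sequence.append(fibonacci_sequence[-1] + fibonacci_sequence[-2])
--
--     def decode_fibonacci_number(fib_str):
--
--         if fib_str.endswith('11'):
--             fib_str = fib_str[:-1]
--
--         number = 0
--         index = 0
--         for bit in fib_str:
--             if bit == '1':
--                 number += fibonacci_sequence[index]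
--             index += 1
--         return number
--
--     def convert_to_ascii(fib_str):
--         result = []
--         while len(fib_str) > 0:
--
--             end_pos = fib_str.find('11')
--             if end_pos == -1:
--                 break
--
--             byte_str = fib_str[:end_pos+2]
--             fib_str = fib_str[end_pos+2:]
--
--             number = decode_fibonacci_number(byte_str)
--
--             if 0 <= number <= 127:
--                 result.append(chr(number))
--
--         return ''.join(result)
--
--     full_bitstream = ''.join(bit_chunks)
--     decoded_text = convert_to_ascii(full_bitstream)
--
--     return decoded_text
-- ===== SOURCE B (Python) =====
-- def decode_fibonacci_bitstream(bit_chunks):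
--     fibonacci_sequence = [1, 2]
--     while sum(fibonacci_sequence) < 256:
--         fibonacci_sequence.append(fibonacci_sequence[-1] + fibonacci_sequence[-2])
--
--     out = []
--     ones = []      # indices (within the current codeword) of '1' bits seen so far
--     idx = 0
--     prev = '0'
--     for bit in ''.join(bit_chunks):
--         if bit == '1' and prev == '1':
--             # terminator '11' found: ones already includes its first '1'
--             number = 0
--             for i in ones:
--                 number += fibonacci_sequence[i]
--             if 0 <= number <= 127:
--                 out.append(chr(number))
--             ones = []
--             idx = 0
--             prev = '0'
--         else:
--             if bit == '1':
--                 ones.append(idx)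
--             idx += 1
--             prev = bit
--     return ''.join(out)
-- ===== Notes on version B (the rewrite author's own statement) =====
-- stated objective: alternative
-- what changed: Replaces the repeated find('11')/slice splitting of the joined bitstream and per-codeword decode helper by a single streaming pass that keeps the current codeword's one-bit positions and the previous bit, finalizing a character at each '1' that follows a '1'.
import Mathlib
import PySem

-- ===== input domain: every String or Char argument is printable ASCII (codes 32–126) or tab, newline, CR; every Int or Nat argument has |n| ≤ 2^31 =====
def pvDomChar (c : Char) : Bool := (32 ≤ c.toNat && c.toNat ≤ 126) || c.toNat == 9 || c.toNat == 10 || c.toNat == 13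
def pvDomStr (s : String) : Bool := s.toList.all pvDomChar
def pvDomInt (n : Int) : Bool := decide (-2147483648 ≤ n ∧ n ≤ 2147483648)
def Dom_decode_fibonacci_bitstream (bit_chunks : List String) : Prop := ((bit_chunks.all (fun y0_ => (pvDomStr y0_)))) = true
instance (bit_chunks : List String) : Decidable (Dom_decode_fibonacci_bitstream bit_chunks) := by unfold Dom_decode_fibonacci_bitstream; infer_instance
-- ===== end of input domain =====

-- B replaces A's repeated find('11')/slice splitting of the joined bitstream by a single
-- streaming left-to-right pass keeping (one-bit positions, index, previous bit); objective:
-- alternative decomposition (one pass, no repeated substring searches/slicing).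

-- ===== PORT A =====
-- the while loop building fibonacci_sequence = [1, 2]; ... (shared by both Pythons line for line).
-- The positivity conjunct in the guard only makes the recursion total; on the real call the
-- appended element is always positive, so it never changes the computation.
def pvFibBuild (l : List Int) : List Int :=
  if h : l.sum < 256 ∧ 0 < PySem.List.pyGetD l (-1) 0 + PySem.List.pyGetD l (-2) 0 then
    pvFibBuild (l ++ [PySem.List.pyGetD l (-1) 0 + PySem.List.pyGetD l (-2) 0])
  else l
termination_by (256 - l.sum).toNat
decreasing_by
  obtain ⟨h1, h2⟩ := h
  simp only [List.sum_append, List.sum_cons, List.sum_nil, add_zero]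
  omega

-- decode_fibonacci_number: strip the second terminator bit, then fold (number, index) over the bits
def pvDecodeNumA (fibs : List Int) (cs : List Char) : Int :=
  let cs' := if PySem.Chars.endswith cs ['1', '1'] then PySem.Chars.slice cs none (some (-1)) else cs
  (cs'.foldl (fun (p : Int × Int) bit =>
      (if bit = '1' then p.1 + PySem.List.pyGetD fibs p.2 0 else p.1, p.2 + 1)) (0, 0)).1

-- convert_to_ascii: while the stream is nonempty, cut at the first '11' and decode that codeword
def pvConvertA (fibs : List Int) (cs : List Char) : List Char :=
  if h0 : 0 < cs.length then
    let ep := PySem.Chars.find cs ['1', '1']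
    if hep : ep = -1 then []
    else
      let byte := PySem.Chars.slice cs none (some (ep + 2))
      let rest := PySem.Chars.slice cs (some (ep + 2)) none
      let n := pvDecodeNumA fibs byte
      (if 0 ≤ n ∧ n ≤ 127 then [Char.ofNat n.toNat] else []) ++ pvConvertA fibs rest
  else []
termination_by cs.length
decreasing_by
  have hge : (0 : Int) ≤ PySem.Chars.find cs ['1', '1'] := by
    have := PySem.Chars.neg_one_le_find cs ['1', '1']
    omega
  simp only [PySem.Chars.slice_eq_listSlice, PySem.List.slice_some_none, List.length_drop,
    PySem.List.clampIdx]
  split_ifs <;> omega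

-- fibs = the built table, full = ''.join(bit_chunks)
def decode_fibonacci_bitstream (bit_chunks : List String) : String :=
  String.ofList (pvConvertA (pvFibBuild [1, 2]) (PySem.Str.join "" bit_chunks).toList)

-- ===== PORT B =====
-- one streaming step: on '1' after '1' finalize the codeword from the recorded one-positions,
-- otherwise record the position of a '1' and advance
def pvStepB (fibs : List Int) (st : List Int × Int × Char × List Char) (bit : Char) :
    List Int × Int × Char × List Char :=
  if bit = '1' ∧ st.2.2.1 = '1' then
    let n := st.1.foldl (fun a i => a + PySem.List.pyGetD fibs i 0) 0
    ([], 0, '0', st.2.2.2 ++ (if 0 ≤ n ∧ n ≤ 127 then [Char.ofNat n.toNat] else []))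
  else ((if bit = '1' then st.1 ++ [st.2.1] else st.1), st.2.1 + 1, bit, st.2.2.2)

def decode_fibonacci_bitstream_alt (bit_chunks : List String) : String :=
  String.ofList (((PySem.Str.join "" bit_chunks).toList.foldl (pvStepB (pvFibBuild [1, 2]))
    ([], 0, '0', [])).2.2.2)

-- ===== PRECONDITION & SPEC =====
-- codeword-length scan used only to state Pre_: k counts the bits of the current codeword
def pvPreGo (k : Nat) (p : Char) : List Char → Bool
  | [] => true
  | c :: t => if p = '1' ∧ c = '1' then decide (k ≤ 11) && pvPreGo 0 '0' t
              else pvPreGo (k + 1) c t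

-- Pre_ excludes exactly the inputs where Python A raises IndexError: a completed codeword
-- (segment up to the greedy first '11' terminator) longer than 12 bits indexes past the
-- 11-entry Fibonacci table.  B raises there too; A returns on every input admitted here.
def Pre_decode_fibonacci_bitstream (bit_chunks : List String) : Prop :=
  pvPreGo 0 '0' (PySem.Str.join "" bit_chunks).toList = true
instance (bit_chunks : List String) : Decidable (Pre_decode_fibonacci_bitstream bit_chunks) := by
  unfold Pre_decode_fibonacci_bitstream; infer_instance

def pvWitness_decode_fibonacci_bitstream : List String := ["0110", "11", "10011"]

def Spec_decode_fibonacci_bitstream (bit_chunks : List String) (out : String) : Prop := out = decode_fibonacci_bitstream_alt bit_chunks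
instance (bit_chunks : List String) (out : String) : Decidable (Spec_decode_fibonacci_bitstream bit_chunks out) := by unfold Spec_decode_fibonacci_bitstream; infer_instance

-- ===== CLAIM (what is proved, stated in full; the proofs are below) =====
def Claim_equal_decode_fibonacci_bitstream : Prop := ∀ (bit_chunks : List String), Dom_decode_fibonacci_bitstream bit_chunks → Pre_decode_fibonacci_bitstream bit_chunks → Spec_decode_fibonacci_bitstream bit_chunks (decode_fibonacci_bitstream bit_chunks)

-- ===== LEMMAS AND PROOFS =====

-- positions (as Int offsets from k) of the '1' bits of cs
def pvOnes : List Char → Int → List Int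
  | [], _ => []
  | c :: t, k => (if c = '1' then [k] else []) ++ pvOnes t (k + 1)
def pvNoPair : List Char → Prop
  | c :: d :: t => ¬(c = '1' ∧ d = '1') ∧ pvNoPair (d :: t)
  | _ => True

theorem pvScan (fibs : List Int) (cs : List Char) : ∀ (p : Char) (ones : List Int) (idx : Int) (out : List Char),
    (p = '1' → cs.head? ≠ some '1') → pvNoPair cs →
    cs.foldl (pvStepB fibs) (ones, idx, p, out)
      = (ones ++ pvOnes cs idx, idx + cs.length, cs.getLastD p, out) := by
  induction cs with
  | nil => intro p ones idx out _ _; simp [pvOnes]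
  | cons c t ih =>
    intro p ones idx out hhead hnp
    have hcond : ¬ (c = '1' ∧ p = '1') := by
      rintro ⟨rfl, rfl⟩
      exact hhead rfl (by simp)
    have hstep : pvStepB fibs (ones, idx, p, out) c
        = ((if c = '1' then ones ++ [idx] else ones), idx + 1, c, out) := by
      simp only [pvStepB, if_neg hcond]
    have hhead' : c = '1' → t.head? ≠ some '1' := by
      intro hc
      cases t with
      | nil => simp
      | cons d t' =>
        simp only [List.head?_cons, ne_eq, Option.some.injEq]
        intro hd
        exact hnp.1 ⟨hc, hd⟩
    have hnp' : pvNoPair t := by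
      cases t with
      | nil => trivial
      | cons d t' => exact hnp.2
    simp only [List.foldl_cons, hstep, ih c _ _ out hhead' hnp']
    simp only [pvOnes, Prod.mk.injEq, List.getLastD_cons, List.length_cons]
    refine ⟨by split <;> simp, by omega, ?_⟩
    simp

theorem pvDecodeSum (fibs : List Int) (cs : List Char) : ∀ (n k : Int),
    (cs.foldl (fun (p : Int × Int) bit =>
        (if bit = '1' then p.1 + PySem.List.pyGetD fibs p.2 0 else p.1, p.2 + 1)) (n, k)).1
      = (pvOnes cs k).foldl (fun a i => a + PySem.List.pyGetD fibs i 0) n := by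
  induction cs with
  | nil => intro n k; simp [pvOnes]
  | cons c t ih =>
    intro n k
    simp only [List.foldl_cons, pvOnes]
    by_cases hc : c = '1'
    · simp only [if_pos hc, ih]
      simp
    · simp only [if_neg hc, ih]
      simp

theorem pvNoPair_of_not_infix (cs : List Char) (h : ¬ ['1', '1'] <:+: cs) : pvNoPair cs := by
  induction cs with
  | nil => trivial
  | cons c t ih =>
    cases t with
    | nil => trivial
    | cons d t' =>
      refine ⟨?_, ih ?_⟩
      · rintro ⟨rfl, rfl⟩
        exact h ⟨[], t', rfl⟩
      · rintro ⟨s, u, hsu⟩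
        exact h ⟨c :: s, u, by simp only [List.cons_append]; rw [hsu]⟩

theorem pvMain (fibs : List Int) : ∀ (n : Nat) (cs : List Char), cs.length = n → ∀ (out : List Char),
    (cs.foldl (pvStepB fibs) ([], 0, '0', out)).2.2.2 = out ++ pvConvertA fibs cs := by
  intro n
  induction n using Nat.strong_induction_on with
  | _ n ih =>
  intro cs hlen out
  by_cases hnil : cs = []
  · subst hnil
    rw [pvConvertA]
    simp
  · have h0 : 0 < cs.length := List.length_pos_iff.mpr hnil
    by_cases hf : PySem.Chars.find cs ['1', '1'] = -1
    · -- no terminator anywhere: the scan never finalizes, A's loop breaks immediately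
      have hnp := pvNoPair_of_not_infix cs ((PySem.Chars.find_eq_neg_one_iff cs ['1','1']).mp hf)
      rw [pvScan fibs cs '0' [] 0 out (by intro hc; exact absurd hc (by decide)) hnp]
      rw [pvConvertA]
      simp only [dif_pos h0, dif_pos hf]
      simp
    · have hge : (0 : Int) ≤ PySem.Chars.find cs ['1', '1'] := by
        have := PySem.Chars.neg_one_le_find cs ['1', '1']
        omega
      obtain ⟨⟨r, hr⟩, hmin⟩ := PySem.Chars.find_spec (s := cs) (sub := ['1','1']) hge
      set m := (PySem.Chars.find cs ['1','1']).toNat with hm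
      have hcs : cs = cs.take m ++ '1' :: '1' :: r := by
        conv_lhs => rw [← List.take_append_drop m cs, ← hr]
        rfl
      set t := cs.take m with ht
      have hlen2 : cs.length = t.length + 2 + r.length := by
        conv_lhs => rw [hcs]
        simp [List.length_append]
        omega
      have htl : t.length = m := by
        have : t.length = min m cs.length := by rw [ht]; simp
        omega
      -- byte = t ++ "11", rest = r
      have hbyte : PySem.Chars.slice cs none (some (PySem.Chars.find cs ['1','1'] + 2)) = t ++ ['1', '1'] := by
        simp only [PySem.Chars.slice_eq_listSlice]
        rw [PySem.List.slice_to cs (by omega)]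
        have h2 : (PySem.Chars.find cs ['1','1'] + 2).toNat = t.length + 2 := by omega
        rw [h2]
        conv_lhs => rw [hcs]
        rw [List.take_length_add_append]
        simp
      have hrest : PySem.Chars.slice cs (some (PySem.Chars.find cs ['1','1'] + 2)) none = r := by
        simp only [PySem.Chars.slice_eq_listSlice]
        rw [PySem.List.slice_from cs (by omega)]
        have h2 : (PySem.Chars.find cs ['1','1'] + 2).toNat = t.length + 2 := by omega
        rw [h2]
        conv_lhs => rw [hcs]
        rw [List.drop_length_add_append]
        simp
      -- the decoded number of the codeword
      have hnum : pvDecodeNumA fibs (t ++ ['1', '1'])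
          = (pvOnes (t ++ ['1']) 0).foldl (fun a i => a + PySem.List.pyGetD fibs i 0) 0 := by
        unfold pvDecodeNumA
        rw [if_pos (by
          exact (PySem.Chars.endswith_iff (t ++ ['1','1']) ['1','1']).mpr (List.suffix_append t ['1','1']))]
        simp only [PySem.Chars.slice_eq_listSlice, PySem.List.slice_to_neg_one]
        have : (t ++ ['1', '1']).dropLast = t ++ ['1'] := by
          have : t ++ ['1', '1'] = (t ++ ['1']) ++ ['1'] := by simp
          rw [this, List.dropLast_concat]
        rw [this, pvDecodeSum]
      have hsplit : cs = (t ++ ['1']) ++ '1' :: r := by rw [hcs]; simp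
      -- no adjacent pair before the terminator
      have hnp1 : pvNoPair (t ++ ['1']) := by
        apply pvNoPair_of_not_infix
        rintro ⟨s, u, hsu⟩
        have hslen : s.length + 2 + u.length = t.length + 1 := by
          have := congrArg List.length hsu
          simp [List.length_append] at this
          omega
        apply hmin s.length (by omega)
        have hdrop : List.drop s.length cs = ['1', '1'] ++ (u ++ '1' :: r) := by
          have e : cs = s ++ (['1', '1'] ++ (u ++ '1' :: r)) := by
            rw [hsplit, ← hsu]
            simp [List.append_assoc]
          rw [e, List.drop_left]
        exact ⟨u ++ '1' :: r, hdrop.symm⟩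
      -- run the fold: prefix scan, the finalizing step, then the tail by induction
      conv_lhs => rw [hsplit]
      rw [List.foldl_append]
      rw [pvScan fibs (t ++ ['1']) '0' [] 0 out (by intro hc; exact absurd hc (by decide)) hnp1]
      simp only [List.foldl_cons]
      rw [show pvStepB fibs ([] ++ pvOnes (t ++ ['1']) 0, 0 + ((t ++ ['1']).length : Int), (t ++ ['1']).getLastD '0', out) '1'
          = ([], 0, '0', out ++ (if 0 ≤ (pvOnes (t ++ ['1']) 0).foldl (fun a i => a + PySem.List.pyGetD fibs i 0) 0 ∧ (pvOnes (t ++ ['1']) 0).foldl (fun a i => a + PySem.List.pyGetD fibs i 0) 0 ≤ 127 then [Char.ofNat ((pvOnes (t ++ ['1']) 0).foldl (fun a i => a + PySem.List.pyGetD fibs i 0) 0).toNat] else [])) from by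
        simp [pvStepB]]
      rw [ih r.length (by omega) r rfl]
      -- unfold A's step on the right
      conv_rhs => rw [pvConvertA]
      simp only [dif_pos h0, dif_neg hf, hbyte, hrest, hnum]
      simp [List.append_assoc]

-- ===== VERDICT (by name: the statement is the Claim_ definition above) =====
theorem decode_fibonacci_bitstream_spec : Claim_equal_decode_fibonacci_bitstream := by
  unfold Claim_equal_decode_fibonacci_bitstream
  intro bit_chunks _ _
  unfold Spec_decode_fibonacci_bitstream decode_fibonacci_bitstream decode_fibonacci_bitstream_alt
  have := pvMain (pvFibBuild [1, 2])
      (PySem.Str.join "" bit_chunks).toList.length (PySem.Str.join "" bit_chunks).toList rfl []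
  simp only [List.nil_append] at this
  rw [this]
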